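-- pv_equiv track=rewrite | github.com/adrian-wp/radialDFT | scripts/utils.py | generate_occupations
-- ===== SOURCE A (Python) =====
-- occupation_exceptions = {
--     # d-block
--     24: [[2, 2, 2, 1], [6, 6], [5]],
--     29: [[2, 2, 2, 1], [6, 6], [10]],
--     41: [[2, 2, 2, 2, 1], [6, 6, 6], [10, 4]],
--     42: [[2, 2, 2, 2, 1], [6, 6, 6], [10, 5]],
--     44: [[2, 2, 2, 2, 1], [6, 6, 6], [10, 7]],
--     45: [[2, 2, 2, 2, 1], [6, 6, 6], [10, 8]],
--     46: [[2, 2, 2, 2], [6, 6, 6], [10, 10]],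
--     47: [[2, 2, 2, 2, 1], [6, 6, 6], [10, 10]],
--     78: [[2, 2, 2, 2, 2, 1], [6, 6, 6, 6], [10, 10, 9], [14]],
--     79: [[2, 2, 2, 2, 2, 1], [6, 6, 6, 6], [10, 10, 10], [14]],
--     103: [[2, 2, 2, 2, 2, 2, 2], [6, 6, 6, 6, 6, 1], [10, 10, 10], [14, 14]],
--     # f-block
--     57: [[2, 2, 2, 2, 2, 2], [6, 6, 6, 6], [10, 10, 1]],
--     58: [[2, 2, 2, 2, 2, 2], [6, 6, 6, 6], [10, 10, 1], [1]],
--     64: [[2, 2, 2, 2, 2, 2], [6, 6, 6, 6], [10, 10, 1], [7]],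
--     89: [[2, 2, 2, 2, 2, 2, 2], [6, 6, 6, 6, 6], [10, 10, 10, 1], [14]],
--     90: [[2, 2, 2, 2, 2, 2, 2], [6, 6, 6, 6, 6], [10, 10, 10, 2], [14]],
--     91: [[2, 2, 2, 2, 2, 2, 2], [6, 6, 6, 6, 6], [10, 10, 10, 1], [14, 2]],
--     92: [[2, 2, 2, 2, 2, 2, 2], [6, 6, 6, 6, 6], [10, 10, 10, 1], [14, 3]],
--     93: [[2, 2, 2, 2, 2, 2, 2], [6, 6, 6, 6, 6], [10, 10, 10, 1], [14, 4]],
--     96: [[2, 2, 2, 2, 2, 2, 2], [6, 6, 6, 6, 6], [10, 10, 10, 1], [14, 7]]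
-- }
--
-- def generate_occupations(z):
--     assert 0 <= z <= 118
--
--     # exceptions are hard-coded
--     if z in occupation_exceptions:
--         return occupation_exceptions[z]
--
--     # orbital order per Aufbau principle: (n, l)
--     orbital_order = [
--         (1, 0),  # 1s
--         (2, 0),  # 2s
--         (2, 1),  # 2p
--         (3, 0),  # 3s
--         (3, 1),  # 3p
--         (4, 0),  # 4s
--         (3, 2),  # 3d
--         (4, 1),  # 4p
--         (5, 0),  # 5s
--         (4, 2),  # 4d
--         (5, 1),  # 5p
--         (6, 0),  # 6s
--         (4, 3),  # 4f
--         (5, 2),  # 5d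
--         (6, 1),  # 6p
--         (7, 0),  # 7s
--         (5, 3),  # 5f
--         (6, 2),  # 6d
--         (7, 1),  # 7p
--     ]
--
--     # fill orbitals in order until no more electrons are left
--     occupations = list()
--     for n, l in orbital_order:
--         if z == 0:
--             break
--         if len(occupations) < l + 1:
--             occupations.append(list())
--         max_e = 2 * (2 * l + 1)
--         if z >= max_e:
--             occupations[l].append(max_e)
--             z -= max_e
--         else:
--             occupations[l].append(z)
--             z = 0
--     return occupations
-- ===== SOURCE B (Python) =====
-- # B derives the exceptional configurations from the Aufbau base by a single electron move
-- # (src_l, dst_l, k) instead of storing the 20 full occupation lists; the base configuration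
-- # comes from a closed-form min(cap, z - prefix) pass instead of A's stateful fill loop.
-- # Note: A returns the module-level exception lists by reference; B always returns fresh lists.
--
-- # l quantum numbers in Aufbau order: 1s 2s 2p 3s 3p 4s 3d 4p 5s 4d 5p 6s 4f 5d 6p 7s 5f 6d 7p
-- _AUFBAU_L = [0, 0, 1, 0, 1, 0, 2, 1, 0, 2, 1, 0, 3, 2, 1, 0, 3, 2, 1]
--
-- # exceptional elements: move k electrons out of the last-filled src_l orbital into dst_l
-- _MOVES = {
--     24: (0, 2, 1), 29: (0, 2, 1), 41: (0, 2, 1), 42: (0, 2, 1),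
--     44: (0, 2, 1), 45: (0, 2, 1), 46: (0, 2, 2), 47: (0, 2, 1),
--     78: (0, 2, 1), 79: (0, 2, 1), 103: (2, 1, 1),
--     57: (3, 2, 1), 58: (3, 2, 1), 64: (3, 2, 1),
--     89: (3, 2, 1), 90: (3, 2, 2), 91: (3, 2, 1), 92: (3, 2, 1),
--     93: (3, 2, 1), 96: (3, 2, 1),
-- }
--
-- def generate_occupations(z):
--     assert 0 <= z <= 118
--
--     # Aufbau base configuration via prefix capacities
--     occ = [[], [], [], []]
--     total = 0
--     for l in _AUFBAU_L:
--         cap = 2 * (2 * l + 1)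
--         take = min(cap, z - total)
--         if take > 0:
--             occ[l].append(take)
--         total += cap
--     while occ and not occ[-1]:
--         occ.pop()
--
--     move = _MOVES.get(z)
--     if move is not None:
--         s, d, k = move
--         occ[s][-1] -= k
--         if occ[s][-1] == 0:
--             occ[s].pop()
--         cap_d = 2 * (2 * d + 1)
--         if occ[d] and occ[d][-1] < cap_d:
--             occ[d][-1] += k
--         else:
--             occ[d].append(k)
--         while occ and not occ[-1]:
--             occ.pop()
--     return occ
-- ===== Notes on version B (the rewrite author's own statement) =====
-- stated objective: alternative
-- what changed: B stores each exceptional element as a single (src_l, dst_l, k) electron move applied to the Aufbau base configuration instead of hard-coding the full occupation lists, and builds the base by a closed-form min(cap, z - prefix) pass over fixed per-l buckets instead of A's stateful fill loop mutating z; A returns exception lists by reference, B returns fresh lists.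
import Mathlib
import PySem

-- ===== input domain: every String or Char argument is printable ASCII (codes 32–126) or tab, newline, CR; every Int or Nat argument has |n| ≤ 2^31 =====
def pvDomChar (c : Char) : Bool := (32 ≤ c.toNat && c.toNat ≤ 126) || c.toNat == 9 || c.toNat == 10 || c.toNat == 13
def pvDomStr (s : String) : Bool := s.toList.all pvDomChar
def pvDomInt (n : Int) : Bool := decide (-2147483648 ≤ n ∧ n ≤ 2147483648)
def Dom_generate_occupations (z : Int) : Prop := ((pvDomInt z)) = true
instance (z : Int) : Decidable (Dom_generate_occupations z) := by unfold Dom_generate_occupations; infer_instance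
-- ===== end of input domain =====

-- B derives the 20 exceptional configurations from the Aufbau base by a single (src_l, dst_l, k)
-- electron move instead of storing the full lists, and builds the base by a closed-form
-- min(cap, z - prefix) pass instead of A's stateful fill loop; equivalence is about return
-- VALUES on 0 ≤ z ≤ 118 (A returns the module-level exception lists by reference, B fresh lists).

-- ===== PORT A =====
def occupation_exceptions : PySem.Dict Int (List (List Int)) := PySem.Dict.ofList [
  (24, ([[2, 2, 2, 1], [6, 6], [5]] : List (List Int))),
  (29, ([[2, 2, 2, 1], [6, 6], [10]] : List (List Int))),
  (41, ([[2, 2, 2, 2, 1], [6, 6, 6], [10, 4]] : List (List Int))),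
  (42, ([[2, 2, 2, 2, 1], [6, 6, 6], [10, 5]] : List (List Int))),
  (44, ([[2, 2, 2, 2, 1], [6, 6, 6], [10, 7]] : List (List Int))),
  (45, ([[2, 2, 2, 2, 1], [6, 6, 6], [10, 8]] : List (List Int))),
  (46, ([[2, 2, 2, 2], [6, 6, 6], [10, 10]] : List (List Int))),
  (47, ([[2, 2, 2, 2, 1], [6, 6, 6], [10, 10]] : List (List Int))),
  (78, ([[2, 2, 2, 2, 2, 1], [6, 6, 6, 6], [10, 10, 9], [14]] : List (List Int))),
  (79, ([[2, 2, 2, 2, 2, 1], [6, 6, 6, 6], [10, 10, 10], [14]] : List (List Int))),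
  (103, ([[2, 2, 2, 2, 2, 2, 2], [6, 6, 6, 6, 6, 1], [10, 10, 10], [14, 14]] : List (List Int))),
  (57, ([[2, 2, 2, 2, 2, 2], [6, 6, 6, 6], [10, 10, 1]] : List (List Int))),
  (58, ([[2, 2, 2, 2, 2, 2], [6, 6, 6, 6], [10, 10, 1], [1]] : List (List Int))),
  (64, ([[2, 2, 2, 2, 2, 2], [6, 6, 6, 6], [10, 10, 1], [7]] : List (List Int))),
  (89, ([[2, 2, 2, 2, 2, 2, 2], [6, 6, 6, 6, 6], [10, 10, 10, 1], [14]] : List (List Int))),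
  (90, ([[2, 2, 2, 2, 2, 2, 2], [6, 6, 6, 6, 6], [10, 10, 10, 2], [14]] : List (List Int))),
  (91, ([[2, 2, 2, 2, 2, 2, 2], [6, 6, 6, 6, 6], [10, 10, 10, 1], [14, 2]] : List (List Int))),
  (92, ([[2, 2, 2, 2, 2, 2, 2], [6, 6, 6, 6, 6], [10, 10, 10, 1], [14, 3]] : List (List Int))),
  (93, ([[2, 2, 2, 2, 2, 2, 2], [6, 6, 6, 6, 6], [10, 10, 10, 1], [14, 4]] : List (List Int))),
  (96, ([[2, 2, 2, 2, 2, 2, 2], [6, 6, 6, 6, 6], [10, 10, 10, 1], [14, 7]] : List (List Int)))]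

def orbital_order : List (Int × Int) :=
  [(1, 0), (2, 0), (2, 1), (3, 0), (3, 1), (4, 0), (3, 2), (4, 1), (5, 0),
   (4, 2), (5, 1), (6, 0), (4, 3), (5, 2), (6, 1), (7, 0), (5, 3), (6, 2), (7, 1)]

-- A's fill loop: state is (remaining z, occupations); the 'break' at z == 0 returns the accumulator
def fillLoopA : List (Int × Int) → Int → List (List Int) → List (List Int)
  | [], _, occupations => occupations
  | (_, l) :: rest, z, occupations =>
    if z = 0 then occupations
    else
      let occupations := if occupations.length < l.toNat + 1 then occupations ++ [[]] else occupations
      let max_e : Int := 2 * (2 * l + 1)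
      if z ≥ max_e then
        fillLoopA rest (z - max_e) (occupations.modify l.toNat (fun s => s ++ [max_e]))
      else
        fillLoopA rest 0 (occupations.modify l.toNat (fun s => s ++ [z]))

def generate_occupations (z : Int) : List (List Int) :=
  match occupation_exceptions.get? z with
  | some v => v
  | none => fillLoopA orbital_order z []

-- ===== PORT B =====
def aufbau_l : List Int := [0, 0, 1, 0, 1, 0, 2, 1, 0, 2, 1, 0, 3, 2, 1, 0, 3, 2, 1]

-- exceptional elements as a single electron move (src_l, dst_l, k) applied to the Aufbau base
def exception_moves : PySem.Dict Int (Int × Int × Int) := PySem.Dict.ofList [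
  (24, (0, 2, 1)), (29, (0, 2, 1)), (41, (0, 2, 1)), (42, (0, 2, 1)),
  (44, (0, 2, 1)), (45, (0, 2, 1)), (46, (0, 2, 2)), (47, (0, 2, 1)),
  (78, (0, 2, 1)), (79, (0, 2, 1)), (103, (2, 1, 1)),
  (57, (3, 2, 1)), (58, (3, 2, 1)), (64, (3, 2, 1)),
  (89, (3, 2, 1)), (90, (3, 2, 2)), (91, (3, 2, 1)), (92, (3, 2, 1)),
  (93, (3, 2, 1)), (96, (3, 2, 1))]

-- while occ and not occ[-1]: occ.pop()  — drop trailing empty sublists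
def trimTrailing (occ : List (List Int)) : List (List Int) :=
  (occ.reverse.dropWhile (· == [])).reverse

-- the base-configuration pass: occ[l].append(take) when take > 0, total accumulates caps
def buildBase (z : Int) : List (List Int) :=
  (aufbau_l.foldl
    (fun (st : List (List Int) × Int) l =>
      let cap : Int := 2 * (2 * l + 1)
      let take := min cap (z - st.2)
      let occ := if take > 0 then st.1.modify l.toNat (fun s => s ++ [take]) else st.1
      (occ, st.2 + cap))
    ([[], [], [], []], 0)).1

def generate_occupations_alt (z : Int) : List (List Int) :=
  let occ := trimTrailing (buildBase z)
  match exception_moves.get? z with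
  | none => occ
  | some (s, d, k) =>
    -- occ[s][-1] -= k; if occ[s][-1] == 0: occ[s].pop()
    let occ := occ.modify s.toNat (fun xs =>
      let xs := xs.modify (xs.length - 1) (fun e => e - k)
      if xs.getLast? == some 0 then xs.dropLast else xs)
    let cap_d : Int := 2 * (2 * d + 1)
    -- if occ[d] and occ[d][-1] < cap_d: occ[d][-1] += k  else: occ[d].append(k)
    let occ := occ.modify d.toNat (fun ys =>
      if ys ≠ [] ∧ ys.getLast?.getD 0 < cap_d then ys.modify (ys.length - 1) (fun e => e + k)
      else ys ++ [k])
    trimTrailing occ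

-- ===== PRECONDITION & SPEC =====
-- A's 'assert 0 <= z <= 118' raises AssertionError outside this range; Pre_ excludes exactly those inputs.
def Pre_generate_occupations (z : Int) : Prop := 0 ≤ z ∧ z ≤ 118
instance (z : Int) : Decidable (Pre_generate_occupations z) := by unfold Pre_generate_occupations; infer_instance
def pvWitness_generate_occupations : Int := (12)
def Spec_generate_occupations (z : Int) (out : List (List Int)) : Prop := out = generate_occupations_alt z
instance (z : Int) (out : List (List Int)) : Decidable (Spec_generate_occupations z out) := by unfold Spec_generate_occupations; infer_instance

-- ===== CLAIM (what is proved, stated in full; the proofs are below) =====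
def Claim_equal_generate_occupations : Prop := ∀ (z : Int), Dom_generate_occupations z → Pre_generate_occupations z → Spec_generate_occupations z (generate_occupations z)

-- ===== LEMMAS AND PROOFS =====
-- the whole admitted domain is the 119 integers 0..118: check them all by kernel evaluation
set_option maxRecDepth 8000 in
theorem agree_on_range : ∀ n : Nat, n < 119 → generate_occupations (n : Int) = generate_occupations_alt (n : Int) := by
  decide

-- ===== VERDICT (by name: the statement is the Claim_ definition above) =====
theorem generate_occupations_spec : Claim_equal_generate_occupations := by
  intro z _ hpre
  unfold Spec_generate_occupations
  obtain ⟨h0, h1⟩ := hpre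
  have hz : z = ((z.toNat : Nat) : Int) := by omega
  rw [hz]
  exact agree_on_range z.toNat (by omega)
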